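-- pv_equiv track=rewrite | github.com/Inspirementt/playground | brutalforce.py | password_to_index
-- ===== SOURCE A (Python) =====
-- def password_to_index(password, charset):
--     base = len(charset)
--     index = 0
--     for i, char in enumerate(reversed(password)):
--         try:
--             power = base ** i
--             index += charset.index(char) * power
--         except ValueError:
--             return None
--     return index
-- ===== SOURCE B (Python) =====
-- def password_to_index(password, charset):
--     digits = []
--     for char in password:
--         pos = charset.find(char)
--         if pos == -1:
--             return None
--         digits.append(pos)
--     index = 0
--     for d in digits:
--         index = index * len(charset) + d
--     return index
-- ===== Notes on version B (the rewrite author's own statement) =====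
-- stated objective: faster
-- what changed: B replaces A's single reversed loop that recomputes base**i and catches ValueError with two staged passes: first map each character to its position via str.find (testing for -1 instead of an exception), then combine the digit list with a left-to-right Horner fold with no power computation.
import Mathlib
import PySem

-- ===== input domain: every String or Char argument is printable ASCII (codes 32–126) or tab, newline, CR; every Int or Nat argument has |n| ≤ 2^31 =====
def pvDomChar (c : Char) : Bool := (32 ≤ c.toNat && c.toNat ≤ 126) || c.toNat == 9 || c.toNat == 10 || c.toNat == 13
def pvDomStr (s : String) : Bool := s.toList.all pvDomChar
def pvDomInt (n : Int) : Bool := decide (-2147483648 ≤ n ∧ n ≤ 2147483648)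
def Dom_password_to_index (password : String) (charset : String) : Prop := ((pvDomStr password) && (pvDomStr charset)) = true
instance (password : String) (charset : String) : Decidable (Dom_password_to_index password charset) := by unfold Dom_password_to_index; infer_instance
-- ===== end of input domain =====

-- B replaces A's reversed loop with base**i powers and try/except by two staged passes:
-- str.find-based digit extraction, then a Horner fold (objective: faster, no power computation).

-- ===== PORT A =====
-- A's loop: for i, char in enumerate(reversed(password)): index += charset.index(char) * base ** i;
-- the enumerate counter is the explicit Nat argument i; charset.index raising ValueError = index? none.
def pvGoA (cs : List Char) (base : Int) : List Char → Nat → Int → Option Int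
  | [], _, index => some index
  | c :: rest, i, index =>
    match PySem.List.index? cs c with
    | none => none
    | some j => pvGoA cs base rest (i + 1) (index + (j : Int) * base ^ i)

def password_to_index (password : String) (charset : String) : Option Int :=
  pvGoA charset.toList ((charset.toList.length : Int)) password.toList.reverse 0 0

-- ===== PORT B =====
-- B's first loop: pos = charset.find(char); if pos == -1: return None; digits.append(pos)
def pvDigits (cs : List Char) : List Char → Option (List Int)
  | [] => some []
  | c :: rest =>
    let pos := PySem.Chars.find cs [c]
    if pos = -1 then none
    else (pvDigits cs rest).map (fun ds => pos :: ds)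

-- B's second loop: for d in digits: index = index * len(charset) + d
def pvHorner (base : Int) (ds : List Int) : Int :=
  ds.foldl (fun index d => index * base + d) 0

def password_to_index_alt (password : String) (charset : String) : Option Int :=
  (pvDigits charset.toList password.toList).map (pvHorner ((charset.toList.length : Int)))

-- ===== PRECONDITION & SPEC =====
def Spec_password_to_index (password : String) (charset : String) (out : Option Int) : Prop := out = password_to_index_alt password charset
instance (password : String) (charset : String) (out : Option Int) : Decidable (Spec_password_to_index password charset out) := by unfold Spec_password_to_index; infer_instance

-- ===== CLAIM (what is proved, stated in full; the proofs are below) =====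
def Claim_equal_password_to_index : Prop := ∀ (password : String) (charset : String), Dom_password_to_index password charset → Spec_password_to_index password charset (password_to_index password charset)

-- ===== LEMMAS AND PROOFS =====

-- [c] is a prefix of l iff l's head is c
theorem pvSingleton_prefix_iff (c : Char) (l : List Char) : [c] <+: l ↔ l.head? = some c := by
  constructor
  · rintro ⟨t, rfl⟩; rfl
  · intro h
    cases l with
    | nil => simp at h
    | cons x xs => simp at h; subst h; exact ⟨xs, rfl⟩

-- str.find of a single character equals list index? (or -1 when absent)
theorem pvFind_singleton (cs : List Char) (c : Char) :
    PySem.Chars.find cs [c] = match PySem.List.index? cs c with | none => -1 | some k => (k : Int) := by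
  cases h : PySem.List.index? cs c with
  | none =>
    have hmem : c ∉ cs := (PySem.List.index?_eq_none_iff cs c).mp h
    rw [PySem.Chars.find_eq_neg_one_iff]
    intro hinf
    exact hmem ((List.singleton_sublist).mp hinf.sublist)
  | some k =>
    obtain ⟨hk, hget, hmin⟩ := PySem.List.getElem_of_index?_eq_some h
    have hmem : c ∈ cs := hget ▸ List.getElem_mem hk
    have hne : PySem.Chars.find cs [c] ≠ -1 := by
      rw [ne_eq, PySem.Chars.find_eq_neg_one_iff, not_not]
      obtain ⟨pre, suf, rfl⟩ := List.append_of_mem hmem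
      exact ⟨pre, suf, by simp⟩
    have hpos : 0 ≤ PySem.Chars.find cs [c] := by
      have := PySem.Chars.neg_one_le_find cs [c]; omega
    obtain ⟨hpre, hmin'⟩ := PySem.Chars.find_spec hpos
    have hgetf : cs[(PySem.Chars.find cs [c]).toNat]? = some c := by
      rw [← List.head?_drop]
      exact (pvSingleton_prefix_iff c _).mp hpre
    -- find ≥ k: no earlier occurrence of c before find-position… actually both are first occurrence
    have hlt : (PySem.Chars.find cs [c]).toNat < cs.length := by
      rcases List.getElem?_eq_some_iff.mp hgetf with ⟨h1, _⟩; exact h1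
    have h1 : ¬ (PySem.Chars.find cs [c]).toNat < k := by
      intro hcon
      obtain ⟨_, hv⟩ := List.getElem?_eq_some_iff.mp hgetf
      exact hmin _ (by omega) hv
    have h2 : ¬ k < (PySem.Chars.find cs [c]).toNat := by
      intro hcon
      apply hmin' k hcon
      rw [pvSingleton_prefix_iff, List.head?_drop]
      exact List.getElem?_eq_some_iff.mpr ⟨hk, hget⟩
    have : (PySem.Chars.find cs [c]).toNat = k := by omega
    dsimp only
    omega

-- little-endian value of a char list under the charset (first char least significant); none iff some char missing
def pvVal (cs : List Char) (base : Int) : List Char → Option Int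
  | [] => some 0
  | c :: rest =>
    (PySem.List.index? cs c).bind fun j => (pvVal cs base rest).map fun s => (j : Int) + base * s

theorem pvGoA_eq_val (cs : List Char) (base : Int) :
    ∀ (l : List Char) (i : Nat) (acc : Int),
      pvGoA cs base l i acc = (pvVal cs base l).map (fun s => acc + base ^ i * s) := by
  intro l
  induction l with
  | nil => intro i acc; simp [pvGoA, pvVal]
  | cons c rest ih =>
    intro i acc
    simp only [pvGoA, pvVal]
    cases h : PySem.List.index? cs c with
    | none => simp
    | some j =>
      dsimp only
      rw [ih]
      cases pvVal cs base rest with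
      | none => simp
      | some s => simp [pow_succ]; ring

theorem pvVal_append_singleton (cs : List Char) (base : Int) :
    ∀ (xs : List Char) (c : Char),
      pvVal cs base (xs ++ [c]) =
        (pvVal cs base xs).bind fun s =>
          (PySem.List.index? cs c).map fun j => s + (j : Int) * base ^ xs.length := by
  intro xs
  induction xs with
  | nil =>
    intro c
    simp only [List.nil_append, pvVal]
    cases PySem.List.index? cs c <;> simp
  | cons x rest ih =>
    intro c
    simp only [List.cons_append, pvVal, ih]
    cases hx : PySem.List.index? cs x with
    | none => simp
    | some jx =>
      cases hr : pvVal cs base rest with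
      | none => simp
      | some s =>
        cases hc : PySem.List.index? cs c with
        | none => simp
        | some jc => simp [pow_succ]; ring

theorem pvHorner_acc (base : Int) :
    ∀ (ds : List Int) (acc : Int),
      ds.foldl (fun index d => index * base + d) acc = acc * base ^ ds.length + pvHorner base ds := by
  intro ds
  induction ds with
  | nil => intro acc; simp [pvHorner]
  | cons d rest ih =>
    intro acc
    simp only [pvHorner, List.foldl_cons, List.length_cons]
    rw [ih (acc * base + d), ih (0 * base + d)]
    ring

theorem pvDigits_length (cs : List Char) :
    ∀ (l : List Char) (ds : List Int), pvDigits cs l = some ds → ds.length = l.length := by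
  intro l
  induction l with
  | nil => intro ds h; simp [pvDigits] at h; simp [← h]
  | cons c rest ih =>
    intro ds h
    simp only [pvDigits] at h
    split at h
    · simp at h
    · cases hr : pvDigits cs rest with
      | none => rw [hr] at h; simp at h
      | some ds' =>
        rw [hr] at h
        simp only [Option.map_some, Option.some.injEq] at h
        subst h
        simp [ih ds' hr]

-- the reversed little-endian value equals the Horner value of the digit list
theorem pvVal_reverse_eq_digits (cs : List Char) (base : Int) :
    ∀ (l : List Char),
      (pvVal cs base l.reverse).map id = (pvDigits cs l).map (pvHorner base) := by
  intro l
  induction l with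
  | nil => simp [pvVal, pvDigits, pvHorner]
  | cons c rest ih =>
    simp only [List.reverse_cons, pvVal_append_singleton, pvDigits, pvFind_singleton]
    cases hc : PySem.List.index? cs c with
    | none =>
      cases pvVal cs base rest.reverse <;> simp
    | some j =>
      cases hr : pvVal cs base rest.reverse with
      | none =>
        rw [hr] at ih
        cases hd : pvDigits cs rest with
        | none => split <;> simp
        | some ds => rw [hd] at ih; simp at ih
      | some s =>
        rw [hr] at ih
        cases hd : pvDigits cs rest with
        | none => rw [hd] at ih; simp at ih
        | some ds =>
          rw [hd] at ih
          simp only [Option.map_some, id_eq, Option.some.injEq] at ih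
          have hlen : ds.length = rest.length := pvDigits_length cs rest ds hd
          have hj : ¬ ((j : Int) = -1) := by omega
          have hcons : s + (j : Int) * base ^ rest.length = pvHorner base ((j : Int) :: ds) := by
            show s + (j : Int) * base ^ rest.length =
              List.foldl (fun index d => index * base + d) ((0 : Int) * base + (j : Int)) ds
            rw [pvHorner_acc base ds ((0 : Int) * base + (j : Int)), ih, hlen]
            ring
          rw [if_neg hj]
          show some (s + (j : Int) * base ^ rest.reverse.length) = some (pvHorner base ((j : Int) :: ds))
          rw [List.length_reverse, hcons]

-- ===== VERDICT (by name: the statement is the Claim_ definition above) =====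
theorem password_to_index_spec : Claim_equal_password_to_index := by
  intro password charset _
  unfold Spec_password_to_index password_to_index password_to_index_alt
  rw [pvGoA_eq_val]
  have h := pvVal_reverse_eq_digits charset.toList ((charset.toList.length : Int)) password.toList
  cases hv : pvVal charset.toList ((charset.toList.length : Int)) password.toList.reverse with
  | none =>
    rw [hv] at h
    cases hd : pvDigits charset.toList password.toList with
    | none => simp
    | some ds => rw [hd] at h; simp at h
  | some s =>
    rw [hv] at h
    cases hd : pvDigits charset.toList password.toList with
    | none => rw [hd] at h; simp at h
    | some ds =>
      rw [hd] at h
      simp only [Option.map_some, id_eq, Option.some.injEq] at h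
      simp [h]
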